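-- pv_equiv track=rewrite | github.com/AustinBao/LeetCode | Contest/Olympiad/2022/Good Groups.py | goodGroups
-- ===== SOURCE A (Python) =====
-- def goodGroups(num_tog, tog, num_sep, sep, num_group, groups):
--     counter = 0
--     for indi_groups in groups:
--         if together(indi_groups, tog) is False:
--             counter += 1
--         if separate(indi_groups, sep) is False:
--             counter += 1
--
--     return counter
--
-- def together(group, tog):
--     for inseparatable in tog:
--         for index2, student in enumerate(inseparatable):
--             if student in group:
--                 if index2 == 1:
--                     if inseparatable[0] not in group:
--                         return False
--                     if inseparatable[0] in group:
--                         break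
--                 else:
--                     if inseparatable[1] not in group:
--                         return False
--                     if inseparatable[1] in group:
--                         break
--     return True
--
-- def separate(group, sep):
--     for separated in sep:
--         for index2, name in enumerate(separated):
--             if name in group:
--                 if index2 == 1:
--                     if separated[0] in group:
--                         return False
--                     if separated[0] not in group:
--                         break
--                 else:
--                     if separated[1] in group:
--                         return False
--                     if separated[1] not in group:
--                         break
--     return True
-- ===== SOURCE B (Python) =====
-- def goodGroups(num_tog, tog, num_sep, sep, num_group, groups):
--     # inverted index: student -> set of indices of groups containing it
--     index_of = {}
--     for i, g in enumerate(groups):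
--         for student in g:
--             index_of.setdefault(student, set()).add(i)
--     empty = set()
--     tog_bad = set()
--     for p in tog:
--         seen = set()
--         for j, x in enumerate(p):
--             hits = index_of.get(x, empty) - seen   # groups whose first member of p is x
--             if hits:
--                 partner = index_of.get(p[0], empty) if j == 1 else index_of.get(p[1], empty)
--                 tog_bad |= hits - partner
--             seen |= index_of.get(x, empty)
--     sep_bad = set()
--     for p in sep:
--         seen = set()
--         for j, x in enumerate(p):
--             hits = index_of.get(x, empty) - seen
--             if hits:
--                 partner = index_of.get(p[0], empty) if j == 1 else index_of.get(p[1], empty)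
--                 sep_bad |= hits & partner
--             seen |= index_of.get(x, empty)
--     return len(tog_bad) + len(sep_bad)
-- ===== Notes on version B (the rewrite author's own statement) =====
-- stated objective: alternative
-- what changed: Replaces A's per-group nested membership scans (for each group, rescan every tog/sep pair with index-case analysis and break/return control flow) by an inverted index student -> set of group indices built once; each pair is then processed once with set operations on index sets (first-hit minus seen, then difference with the partner's index set for together / intersection for separate), and the answer is len(tog_bad)+len(sep_bad).
-- outside the precondition, e.g. on goodGroups(1, [['a', 'b'], ['a']], 0, [], 1, [['a']]): A returns 1, B raises IndexError; on goodGroups(1, [['a']], 0, [], 1, [['a']]): A raises IndexError, B raises IndexError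
import Mathlib
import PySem

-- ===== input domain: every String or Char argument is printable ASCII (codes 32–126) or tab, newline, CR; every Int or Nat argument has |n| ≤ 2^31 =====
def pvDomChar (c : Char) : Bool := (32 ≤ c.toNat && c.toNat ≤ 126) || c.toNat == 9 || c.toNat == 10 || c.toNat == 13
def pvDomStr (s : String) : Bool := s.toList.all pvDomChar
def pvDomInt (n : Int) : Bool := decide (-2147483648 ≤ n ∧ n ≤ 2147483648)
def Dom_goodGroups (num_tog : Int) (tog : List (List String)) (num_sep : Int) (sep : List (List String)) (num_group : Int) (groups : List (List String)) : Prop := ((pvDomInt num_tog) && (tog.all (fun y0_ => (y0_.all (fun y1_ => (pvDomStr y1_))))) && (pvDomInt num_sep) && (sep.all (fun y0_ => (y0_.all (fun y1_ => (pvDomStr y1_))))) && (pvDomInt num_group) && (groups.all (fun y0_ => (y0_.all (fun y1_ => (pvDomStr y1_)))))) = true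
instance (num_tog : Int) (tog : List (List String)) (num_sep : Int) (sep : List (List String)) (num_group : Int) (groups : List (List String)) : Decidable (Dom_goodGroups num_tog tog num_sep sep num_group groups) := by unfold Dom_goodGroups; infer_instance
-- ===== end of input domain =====

-- ===== PORT A =====
-- B replaces A's per-group nested membership scans by an inverted index (student -> set of
-- group indices) consumed with set operations; equivalence of the RETURN value is claimed on
-- Pre_ (no 1-element pair whose student occurs in a group — there Python A can raise IndexError
-- and Python B raises IndexError too).

-- inner loop of together(): scan over enumerate(pair); `pyGetD p _ ""` is pair[0]/pair[1];
-- inside Pre_ every access the Python actually performs is in range.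
def pvTogScan (group p : List String) : List (Int × String) → Bool
  | [] => true
  | (i, student) :: rest =>
    if group.contains student then
      (if i == 1 then group.contains (PySem.List.pyGetD p 0 "")   -- not in group: return False; in group: break
       else group.contains (PySem.List.pyGetD p 1 ""))
    else pvTogScan group p rest

-- together(group, tog): False as soon as one pair fails (early return = short-circuit all)
def pvTogether (group : List String) (tog : List (List String)) : Bool :=
  tog.all (fun p => pvTogScan group p (PySem.List.enumerate p 0))

def pvSepScan (group p : List String) : List (Int × String) → Bool
  | [] => true
  | (i, name) :: rest =>
    if group.contains name then
      (if i == 1 then !(group.contains (PySem.List.pyGetD p 0 ""))   -- in group: return False; not in group: break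
       else !(group.contains (PySem.List.pyGetD p 1 "")))
    else pvSepScan group p rest

def pvSeparate (group : List String) (sep : List (List String)) : Bool :=
  sep.all (fun p => pvSepScan group p (PySem.List.enumerate p 0))

def goodGroups (num_tog : Int) (tog : List (List String)) (num_sep : Int) (sep : List (List String)) (num_group : Int) (groups : List (List String)) : Int :=
  groups.foldl (fun counter g =>
    let counter := if pvTogether g tog = false then counter + 1 else counter
    if pvSeparate g sep = false then counter + 1 else counter) 0

-- ===== PORT B =====
-- index_of.setdefault(student, set()).add(i)  ==  index_of[student] = index_of.get(student, set()) | {i}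
def pvIndexOf (groups : List (List String)) : PySem.Dict String (PySem.Set Int) :=
  (PySem.List.enumerate groups 0).foldl
    (fun d ig => ig.2.foldl
      (fun d student => PySem.Dict.modify d student PySem.Set.empty (fun t => PySem.Set.add t ig.1)) d)
    PySem.Dict.empty

-- index_of.get(x, empty)
def pvLook (idx : PySem.Dict String (PySem.Set Int)) (x : String) : PySem.Set Int :=
  PySem.Dict.getD idx x PySem.Set.empty

-- inner loop over enumerate(p) for the together pairs; state = (tog_bad, seen);
-- `pyGetD p _ ""` is p[0]/p[1] (inside Pre_ the Python access is in range when evaluated)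
def pvPairFoldT (idx : PySem.Dict String (PySem.Set Int)) (p : List String)
    (st : PySem.Set Int × PySem.Set Int) :
    List (Int × String) → PySem.Set Int × PySem.Set Int
  | [] => st
  | (j, x) :: rest =>
    let hits := PySem.Set.diff (pvLook idx x) st.2
    let bad := if hits ≠ [] then
        PySem.Set.union st.1 (PySem.Set.diff hits
          (if j == 1 then pvLook idx (PySem.List.pyGetD p 0 "")
           else pvLook idx (PySem.List.pyGetD p 1 "")))
      else st.1
    pvPairFoldT idx p (bad, PySem.Set.union st.2 (pvLook idx x)) rest

-- same loop for the separate pairs: `sep_bad |= hits & partner`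
def pvPairFoldS (idx : PySem.Dict String (PySem.Set Int)) (p : List String)
    (st : PySem.Set Int × PySem.Set Int) :
    List (Int × String) → PySem.Set Int × PySem.Set Int
  | [] => st
  | (j, x) :: rest =>
    let hits := PySem.Set.diff (pvLook idx x) st.2
    let bad := if hits ≠ [] then
        PySem.Set.union st.1 (PySem.Set.inter hits
          (if j == 1 then pvLook idx (PySem.List.pyGetD p 0 "")
           else pvLook idx (PySem.List.pyGetD p 1 "")))
      else st.1
    pvPairFoldS idx p (bad, PySem.Set.union st.2 (pvLook idx x)) rest

def goodGroups_alt (num_tog : Int) (tog : List (List String)) (num_sep : Int) (sep : List (List String)) (num_group : Int) (groups : List (List String)) : Int :=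
  let idx := pvIndexOf groups
  let togBad := tog.foldl
    (fun bad p => (pvPairFoldT idx p (bad, PySem.Set.empty) (PySem.List.enumerate p 0)).1)
    PySem.Set.empty
  let sepBad := sep.foldl
    (fun bad p => (pvPairFoldS idx p (bad, PySem.Set.empty) (PySem.List.enumerate p 0)).1)
    PySem.Set.empty
  PySem.Set.len togBad + PySem.Set.len sepBad

-- ===== PRECONDITION & SPEC =====
-- Pre_ excludes inputs with a 1-element tog/sep pair whose single student occurs in some group:
-- on those p[1] can raise IndexError in Python A (and does raise in Python B); every other
-- input A accepts is admitted.
def Pre_goodGroups (num_tog : Int) (tog : List (List String)) (num_sep : Int) (sep : List (List String)) (num_group : Int) (groups : List (List String)) : Prop :=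
  ((tog ++ sep).all (fun p =>
    !(p.length == 1 && groups.any (fun g => g.contains (PySem.List.pyGetD p 0 ""))))) = true
instance (num_tog : Int) (tog : List (List String)) (num_sep : Int) (sep : List (List String)) (num_group : Int) (groups : List (List String)) : Decidable (Pre_goodGroups num_tog tog num_sep sep num_group groups) := by unfold Pre_goodGroups; infer_instance

def pvWitness_goodGroups : Int × List (List String) × Int × List (List String) × Int × List (List String) :=
  (1, [["a", "b"]], 1, [["a", "c"]], 2, [["a", "b"], ["c", "a"]])

def Spec_goodGroups (num_tog : Int) (tog : List (List String)) (num_sep : Int) (sep : List (List String)) (num_group : Int) (groups : List (List String)) (out : Int) : Prop := out = goodGroups_alt num_tog tog num_sep sep num_group groups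
instance (num_tog : Int) (tog : List (List String)) (num_sep : Int) (sep : List (List String)) (num_group : Int) (groups : List (List String)) (out : Int) : Decidable (Spec_goodGroups num_tog tog num_sep sep num_group groups out) := by unfold Spec_goodGroups; infer_instance

-- ===== CLAIM (what is proved, stated in full; the proofs are below) =====
def Claim_equal_goodGroups : Prop := ∀ (num_tog : Int) (tog : List (List String)) (num_sep : Int) (sep : List (List String)) (num_group : Int) (groups : List (List String)), Dom_goodGroups num_tog tog num_sep sep num_group groups → Pre_goodGroups num_tog tog num_sep sep num_group groups → Spec_goodGroups num_tog tog num_sep sep num_group groups (goodGroups num_tog tog num_sep sep num_group groups)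

-- ===== LEMMAS AND PROOFS =====

-- the per-pair violation predicates, read off A's scans
def pvBadT (g p : List String) : Bool := !(pvTogScan g p (PySem.List.enumerate p 0))
def pvBadS (g p : List String) : Bool := !(pvSepScan g p (PySem.List.enumerate p 0))

-- ----- A side: the counter is a 0/1-sum over the groups -----

theorem pvTogether_eq (g : List String) (tog : List (List String)) :
    pvTogether g tog = !(tog.any (pvBadT g)) := by
  simp only [pvTogether, List.all_eq_not_any_not]
  rfl

theorem pvSeparate_eq (g : List String) (sep : List (List String)) :
    pvSeparate g sep = !(sep.any (pvBadS g)) := by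
  simp only [pvSeparate, List.all_eq_not_any_not]
  rfl

theorem goodGroups_eq_counts (num_tog : Int) (tog : List (List String)) (num_sep : Int)
    (sep : List (List String)) (num_group : Int) (groups : List (List String)) :
    goodGroups num_tog tog num_sep sep num_group groups =
      (groups.countP (fun g => tog.any (pvBadT g)) : Int) +
      (groups.countP (fun g => sep.any (pvBadS g)) : Int) := by
  unfold goodGroups
  rw [PySem.List.foldl_congr_mem
      (g := fun counter g => counter + ((if tog.any (pvBadT g) then 1 else 0) +
            (if sep.any (pvBadS g) then 1 else 0)))]
  · rw [PySem.List.foldl_add]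
    rw [PySem.List.sum_map_add_int (f := fun g => if tog.any (pvBadT g) then (1:Int) else 0)
        (g := fun g => if sep.any (pvBadS g) then (1:Int) else 0)]
    rw [PySem.List.sum_map_ite_one_zero, PySem.List.sum_map_ite_one_zero]
    ring
  · intro acc g hg
    rw [pvTogether_eq g tog, pvSeparate_eq g sep]
    cases h1 : tog.any (pvBadT g) <;> cases h2 : sep.any (pvBadS g) <;> simp <;> try ring

-- ----- B side: membership in the inverted index -----

-- membership in the inverted index, inner loop
theorem pvIndexOf_inner (g : List String) (j : Int) (d : PySem.Dict String (PySem.Set Int))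
    (s : String) (i : Int) :
    i ∈ PySem.Dict.getD
        (g.foldl (fun d student =>
          PySem.Dict.modify d student PySem.Set.empty (fun t => PySem.Set.add t j)) d)
        s PySem.Set.empty
      ↔ i ∈ PySem.Dict.getD d s PySem.Set.empty ∨ (i = j ∧ s ∈ g) := by
  induction g generalizing d with
  | nil => simp
  | cons a g ih =>
    simp only [List.foldl_cons, ih, PySem.Dict.getD_modify]
    by_cases hsa : s = a
    · subst hsa
      simp [PySem.Set.mem_add]
      tauto
    · simp [hsa]

-- membership in the inverted index, outer loop (generalized over the enumerated tail)
theorem pvIndexOf_outer (L : List (Int × List String)) (d : PySem.Dict String (PySem.Set Int))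
    (s : String) (i : Int) :
    i ∈ PySem.Dict.getD
        (L.foldl (fun d ig => ig.2.foldl
          (fun d student =>
            PySem.Dict.modify d student PySem.Set.empty (fun t => PySem.Set.add t ig.1)) d) d)
        s PySem.Set.empty
      ↔ i ∈ PySem.Dict.getD d s PySem.Set.empty ∨ ∃ q ∈ L, i = q.1 ∧ s ∈ q.2 := by
  induction L generalizing d with
  | nil => simp
  | cons q L ih =>
    simp only [List.foldl_cons, ih, pvIndexOf_inner]
    constructor
    · rintro (⟨h | h⟩ | ⟨q', hq', h⟩)
      · exact Or.inl h
      · exact Or.inr ⟨q, List.mem_cons_self, h⟩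
      · exact Or.inr ⟨q', List.mem_cons_of_mem _ hq', h⟩
    · rintro (h | ⟨q', hq', h⟩)
      · exact Or.inl (Or.inl h)
      · rcases List.mem_cons.mp hq' with rfl | hq'
        · exact Or.inl (Or.inr h)
        · exact Or.inr ⟨q', hq', h⟩

theorem mem_pvLook (groups : List (List String)) (x : String) (i : Int) :
    i ∈ pvLook (pvIndexOf groups) x ↔
      ∃ k : Nat, ∃ _ : k < groups.length, i = (k : Int) ∧ x ∈ groups[k] := by
  unfold pvLook pvIndexOf
  rw [pvIndexOf_outer]
  simp only [PySem.Dict.getD_empty, PySem.Set.empty, List.not_mem_nil, false_or]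
  constructor
  · rintro ⟨q, hq, hi, hx⟩
    rcases (PySem.List.mem_enumerate_iff _ _ _).mp hq with ⟨k, hk, rfl⟩
    exact ⟨k, hk, by simpa using hi, hx⟩
  · rintro ⟨k, hk, rfl, hx⟩
    exact ⟨((k : Int), groups[k]), (PySem.List.mem_enumerate_iff _ _ _).mpr
      ⟨k, hk, by simp⟩, by simp, hx⟩

-- at a fixed group index k the lookup is membership in groups[k]
theorem kmem_pvLook (groups : List (List String)) (k : Nat) (hk : k < groups.length)
    (x : String) :
    ((k : Int) ∈ pvLook (pvIndexOf groups) x) ↔ x ∈ groups[k] := by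
  rw [mem_pvLook]
  constructor
  · rintro ⟨k1, hk1, hkk, hx⟩
    have : k1 = k := by exact_mod_cast hkk.symm
    subst this
    exact hx
  · intro hx
    exact ⟨k, hk, rfl, hx⟩

-- an Int that is no group index is never in any lookup
theorem not_mem_pvLook (groups : List (List String)) (x : String) (i : Int)
    (hi : ¬ ∃ k : Nat, ∃ _ : k < groups.length, i = (k : Int)) :
    i ∉ pvLook (pvIndexOf groups) x := by
  intro h
  rcases (mem_pvLook groups x i).mp h with ⟨k, hk, rfl, _⟩
  exact hi ⟨k, hk, rfl⟩

-- ----- B side: the pair folds flag exactly the groups A's scans reject -----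

-- group index k: the together-pair fold flags k iff A's scan rejects groups[k]
theorem pairFoldT_k (groups : List (List String)) (p : List String) (k : Nat)
    (hk : k < groups.length) (L : List (Int × String))
    (st : PySem.Set Int × PySem.Set Int) :
    (((k : Int) ∈ (pvPairFoldT (pvIndexOf groups) p st L).1 ↔
        (k : Int) ∈ st.1 ∨ ((k : Int) ∉ st.2 ∧ pvTogScan groups[k] p L = false)) ∧
     ((k : Int) ∈ (pvPairFoldT (pvIndexOf groups) p st L).2 ↔
        (k : Int) ∈ st.2 ∨ ∃ jx ∈ L, jx.2 ∈ groups[k])) := by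
  induction L generalizing st with
  | nil => simp [pvPairFoldT, pvTogScan]
  | cons jx rest ih =>
    obtain ⟨j, x⟩ := jx
    rw [show pvPairFoldT (pvIndexOf groups) p st ((j, x) :: rest) =
        pvPairFoldT (pvIndexOf groups) p
          ((if PySem.Set.diff (pvLook (pvIndexOf groups) x) st.2 ≠ [] then
              PySem.Set.union st.1 (PySem.Set.diff
                (PySem.Set.diff (pvLook (pvIndexOf groups) x) st.2)
                (if j == 1 then pvLook (pvIndexOf groups) (PySem.List.pyGetD p 0 "")
                 else pvLook (pvIndexOf groups) (PySem.List.pyGetD p 1 "")))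
            else st.1),
           PySem.Set.union st.2 (pvLook (pvIndexOf groups) x)) rest from rfl]
    rw [show pvTogScan groups[k] p ((j, x) :: rest) =
        (if groups[k].contains x then
          (if j == 1 then groups[k].contains (PySem.List.pyGetD p 0 "")
           else groups[k].contains (PySem.List.pyGetD p 1 ""))
         else pvTogScan groups[k] p rest) from rfl]
    constructor
    · rw [(ih _).1]
      dsimp only
      have hbad : ((k : Int) ∈ (if PySem.Set.diff (pvLook (pvIndexOf groups) x) st.2 ≠ [] then
              PySem.Set.union st.1 (PySem.Set.diff
                (PySem.Set.diff (pvLook (pvIndexOf groups) x) st.2)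
                (if j == 1 then pvLook (pvIndexOf groups) (PySem.List.pyGetD p 0 "")
                 else pvLook (pvIndexOf groups) (PySem.List.pyGetD p 1 "")))
            else st.1)) ↔
          ((k : Int) ∈ st.1 ∨ (x ∈ groups[k] ∧ (k : Int) ∉ st.2 ∧
            (if j == 1 then PySem.List.pyGetD p 0 "" ∉ groups[k]
             else PySem.List.pyGetD p 1 "" ∉ groups[k]))) := by
        by_cases hd : PySem.Set.diff (pvLook (pvIndexOf groups) x) st.2 = []
        · rw [if_neg (not_not.mpr hd)]
          have hnk : ¬ (x ∈ groups[k] ∧ (k : Int) ∉ st.2) := by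
            intro hc
            have hm : (k : Int) ∈ PySem.Set.diff (pvLook (pvIndexOf groups) x) st.2 :=
              (PySem.Set.mem_diff _ _ _).mpr ⟨(kmem_pvLook groups k hk x).mpr hc.1, hc.2⟩
            rw [hd] at hm
            simp at hm
          tauto
        · rw [if_pos hd]
          rw [PySem.Set.mem_union, PySem.Set.mem_diff, PySem.Set.mem_diff,
            kmem_pvLook groups k hk]
          by_cases hj : (j == 1) = true <;>
            simp [hj, kmem_pvLook groups k hk] <;> tauto
      rw [hbad, PySem.Set.mem_union, kmem_pvLook groups k hk]
      by_cases hx : x ∈ groups[k] <;> by_cases hs : (k : Int) ∈ st.2 <;>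
        by_cases hj : (j == 1) = true <;>
        simp [hx, hs, hj, List.contains_iff_mem] <;> tauto
    · rw [(ih _).2]
      dsimp only
      rw [PySem.Set.mem_union, kmem_pvLook groups k hk]
      simp only [List.mem_cons]
      constructor
      · rintro ((h | h) | ⟨q, hq, hg⟩)
        · exact Or.inl h
        · exact Or.inr ⟨(j, x), Or.inl rfl, h⟩
        · exact Or.inr ⟨q, Or.inr hq, hg⟩
      · rintro (h | ⟨q, hq | hq, hg⟩)
        · exact Or.inl (Or.inl h)
        · subst hq; exact Or.inl (Or.inr hg)
        · exact Or.inr ⟨q, hq, hg⟩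

-- group index k: the separate-pair fold flags k iff A's scan rejects groups[k]
theorem pairFoldS_k (groups : List (List String)) (p : List String) (k : Nat)
    (hk : k < groups.length) (L : List (Int × String))
    (st : PySem.Set Int × PySem.Set Int) :
    (((k : Int) ∈ (pvPairFoldS (pvIndexOf groups) p st L).1 ↔
        (k : Int) ∈ st.1 ∨ ((k : Int) ∉ st.2 ∧ pvSepScan groups[k] p L = false)) ∧
     ((k : Int) ∈ (pvPairFoldS (pvIndexOf groups) p st L).2 ↔
        (k : Int) ∈ st.2 ∨ ∃ jx ∈ L, jx.2 ∈ groups[k])) := by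
  induction L generalizing st with
  | nil => simp [pvPairFoldS, pvSepScan]
  | cons jx rest ih =>
    obtain ⟨j, x⟩ := jx
    rw [show pvPairFoldS (pvIndexOf groups) p st ((j, x) :: rest) =
        pvPairFoldS (pvIndexOf groups) p
          ((if PySem.Set.diff (pvLook (pvIndexOf groups) x) st.2 ≠ [] then
              PySem.Set.union st.1 (PySem.Set.inter
                (PySem.Set.diff (pvLook (pvIndexOf groups) x) st.2)
                (if j == 1 then pvLook (pvIndexOf groups) (PySem.List.pyGetD p 0 "")
                 else pvLook (pvIndexOf groups) (PySem.List.pyGetD p 1 "")))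
            else st.1),
           PySem.Set.union st.2 (pvLook (pvIndexOf groups) x)) rest from rfl]
    rw [show pvSepScan groups[k] p ((j, x) :: rest) =
        (if groups[k].contains x then
          (if j == 1 then !(groups[k].contains (PySem.List.pyGetD p 0 ""))
           else !(groups[k].contains (PySem.List.pyGetD p 1 "")))
         else pvSepScan groups[k] p rest) from rfl]
    constructor
    · rw [(ih _).1]
      dsimp only
      have hbad : ((k : Int) ∈ (if PySem.Set.diff (pvLook (pvIndexOf groups) x) st.2 ≠ [] then
              PySem.Set.union st.1 (PySem.Set.inter
                (PySem.Set.diff (pvLook (pvIndexOf groups) x) st.2)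
                (if j == 1 then pvLook (pvIndexOf groups) (PySem.List.pyGetD p 0 "")
                 else pvLook (pvIndexOf groups) (PySem.List.pyGetD p 1 "")))
            else st.1)) ↔
          ((k : Int) ∈ st.1 ∨ (x ∈ groups[k] ∧ (k : Int) ∉ st.2 ∧
            (if j == 1 then PySem.List.pyGetD p 0 "" ∈ groups[k]
             else PySem.List.pyGetD p 1 "" ∈ groups[k]))) := by
        by_cases hd : PySem.Set.diff (pvLook (pvIndexOf groups) x) st.2 = []
        · rw [if_neg (not_not.mpr hd)]
          have hnk : ¬ (x ∈ groups[k] ∧ (k : Int) ∉ st.2) := by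
            intro hc
            have hm : (k : Int) ∈ PySem.Set.diff (pvLook (pvIndexOf groups) x) st.2 :=
              (PySem.Set.mem_diff _ _ _).mpr ⟨(kmem_pvLook groups k hk x).mpr hc.1, hc.2⟩
            rw [hd] at hm
            simp at hm
          tauto
        · rw [if_pos hd]
          rw [PySem.Set.mem_union, PySem.Set.mem_inter, PySem.Set.mem_diff,
            kmem_pvLook groups k hk]
          by_cases hj : (j == 1) = true <;>
            simp [hj, kmem_pvLook groups k hk] <;> tauto
      rw [hbad, PySem.Set.mem_union, kmem_pvLook groups k hk]
      by_cases hx : x ∈ groups[k] <;> by_cases hs : (k : Int) ∈ st.2 <;>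
        by_cases hj : (j == 1) = true <;>
        simp [hx, hs, hj, List.contains_iff_mem] <;> tauto
    · rw [(ih _).2]
      dsimp only
      rw [PySem.Set.mem_union, kmem_pvLook groups k hk]
      simp only [List.mem_cons]
      constructor
      · rintro ((h | h) | ⟨q, hq, hg⟩)
        · exact Or.inl h
        · exact Or.inr ⟨(j, x), Or.inl rfl, h⟩
        · exact Or.inr ⟨q, Or.inr hq, hg⟩
      · rintro (h | ⟨q, hq | hq, hg⟩)
        · exact Or.inl (Or.inl h)
        · subst hq; exact Or.inl (Or.inr hg)
        · exact Or.inr ⟨q, hq, hg⟩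

-- a non-index never enters the bad set
theorem pairFoldT_junk (groups : List (List String)) (p : List String) (i : Int)
    (hi : ¬ ∃ k : Nat, ∃ _ : k < groups.length, i = (k : Int))
    (L : List (Int × String)) (st : PySem.Set Int × PySem.Set Int) :
    (i ∈ (pvPairFoldT (pvIndexOf groups) p st L).1 ↔ i ∈ st.1) := by
  induction L generalizing st with
  | nil => simp [pvPairFoldT]
  | cons jx rest ih =>
    obtain ⟨j, x⟩ := jx
    rw [show pvPairFoldT (pvIndexOf groups) p st ((j, x) :: rest) =
        pvPairFoldT (pvIndexOf groups) p
          ((if PySem.Set.diff (pvLook (pvIndexOf groups) x) st.2 ≠ [] then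
              PySem.Set.union st.1 (PySem.Set.diff
                (PySem.Set.diff (pvLook (pvIndexOf groups) x) st.2)
                (if j == 1 then pvLook (pvIndexOf groups) (PySem.List.pyGetD p 0 "")
                 else pvLook (pvIndexOf groups) (PySem.List.pyGetD p 1 "")))
            else st.1),
           PySem.Set.union st.2 (pvLook (pvIndexOf groups) x)) rest from rfl]
    rw [ih]
    dsimp only
    by_cases hd : PySem.Set.diff (pvLook (pvIndexOf groups) x) st.2 = []
    · rw [if_neg (not_not.mpr hd)]
    · rw [if_pos hd, PySem.Set.mem_union, PySem.Set.mem_diff, PySem.Set.mem_diff]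
      have := not_mem_pvLook groups x i hi
      tauto

theorem pairFoldS_junk (groups : List (List String)) (p : List String) (i : Int)
    (hi : ¬ ∃ k : Nat, ∃ _ : k < groups.length, i = (k : Int))
    (L : List (Int × String)) (st : PySem.Set Int × PySem.Set Int) :
    (i ∈ (pvPairFoldS (pvIndexOf groups) p st L).1 ↔ i ∈ st.1) := by
  induction L generalizing st with
  | nil => simp [pvPairFoldS]
  | cons jx rest ih =>
    obtain ⟨j, x⟩ := jx
    rw [show pvPairFoldS (pvIndexOf groups) p st ((j, x) :: rest) =
        pvPairFoldS (pvIndexOf groups) p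
          ((if PySem.Set.diff (pvLook (pvIndexOf groups) x) st.2 ≠ [] then
              PySem.Set.union st.1 (PySem.Set.inter
                (PySem.Set.diff (pvLook (pvIndexOf groups) x) st.2)
                (if j == 1 then pvLook (pvIndexOf groups) (PySem.List.pyGetD p 0 "")
                 else pvLook (pvIndexOf groups) (PySem.List.pyGetD p 1 "")))
            else st.1),
           PySem.Set.union st.2 (pvLook (pvIndexOf groups) x)) rest from rfl]
    rw [ih]
    dsimp only
    by_cases hd : PySem.Set.diff (pvLook (pvIndexOf groups) x) st.2 = []
    · rw [if_neg (not_not.mpr hd)]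
    · rw [if_pos hd, PySem.Set.mem_union, PySem.Set.mem_inter, PySem.Set.mem_diff]
      have := not_mem_pvLook groups x i hi
      tauto

-- ----- B side: the outer folds over the pair lists -----

theorem mem_togBad (groups tog : List (List String)) (bad : PySem.Set Int) (i : Int) :
    i ∈ tog.foldl (fun bad p =>
        (pvPairFoldT (pvIndexOf groups) p (bad, PySem.Set.empty)
          (PySem.List.enumerate p 0)).1) bad ↔
      i ∈ bad ∨ ∃ k : Nat, ∃ _ : k < groups.length, i = (k : Int) ∧
        tog.any (pvBadT groups[k]) := by
  induction tog generalizing bad with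
  | nil => simp
  | cons p tog ih =>
    rw [List.foldl_cons, ih]
    by_cases hform : ∃ k : Nat, ∃ _ : k < groups.length, i = (k : Int)
    · rcases hform with ⟨k, hk, rfl⟩
      rw [(pairFoldT_k groups p k hk _ _).1]
      have huniq : ∀ k1 : Nat, k1 < groups.length → (k : Int) = (k1 : Int) → k1 = k :=
        fun k1 _ h => by exact_mod_cast h.symm
      simp only [PySem.Set.empty, List.not_mem_nil, not_false_iff, true_and,
        List.any_cons, Bool.or_eq_true, pvBadT, Bool.not_eq_true']
      constructor
      · rintro ((h | h) | ⟨k1, hk1, hkk, h⟩)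
        · exact Or.inl h
        · exact Or.inr ⟨k, hk, rfl, Or.inl h⟩
        · have := huniq k1 hk1 hkk; subst this
          exact Or.inr ⟨k1, hk1, rfl, Or.inr h⟩
      · rintro (h | ⟨k1, hk1, hkk, h | h⟩)
        · exact Or.inl (Or.inl h)
        · have := huniq k1 hk1 hkk; subst this
          exact Or.inl (Or.inr h)
        · have := huniq k1 hk1 hkk; subst this
          exact Or.inr ⟨k1, hk1, rfl, h⟩
    · rw [pairFoldT_junk groups p i hform]
      constructor
      · rintro (h | ⟨k, hk, rfl, _⟩)
        · exact Or.inl h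
        · exact absurd ⟨k, hk, rfl⟩ hform
      · rintro (h | ⟨k, hk, rfl, _⟩)
        · exact Or.inl h
        · exact absurd ⟨k, hk, rfl⟩ hform

theorem mem_sepBad (groups sep : List (List String)) (bad : PySem.Set Int) (i : Int) :
    i ∈ sep.foldl (fun bad p =>
        (pvPairFoldS (pvIndexOf groups) p (bad, PySem.Set.empty)
          (PySem.List.enumerate p 0)).1) bad ↔
      i ∈ bad ∨ ∃ k : Nat, ∃ _ : k < groups.length, i = (k : Int) ∧
        sep.any (pvBadS groups[k]) := by
  induction sep generalizing bad with
  | nil => simp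
  | cons p sep ih =>
    rw [List.foldl_cons, ih]
    by_cases hform : ∃ k : Nat, ∃ _ : k < groups.length, i = (k : Int)
    · rcases hform with ⟨k, hk, rfl⟩
      rw [(pairFoldS_k groups p k hk _ _).1]
      have huniq : ∀ k1 : Nat, k1 < groups.length → (k : Int) = (k1 : Int) → k1 = k :=
        fun k1 _ h => by exact_mod_cast h.symm
      simp only [PySem.Set.empty, List.not_mem_nil, not_false_iff, true_and,
        List.any_cons, Bool.or_eq_true, pvBadS, Bool.not_eq_true']
      constructor
      · rintro ((h | h) | ⟨k1, hk1, hkk, h⟩)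
        · exact Or.inl h
        · exact Or.inr ⟨k, hk, rfl, Or.inl h⟩
        · have := huniq k1 hk1 hkk; subst this
          exact Or.inr ⟨k1, hk1, rfl, Or.inr h⟩
      · rintro (h | ⟨k1, hk1, hkk, h | h⟩)
        · exact Or.inl (Or.inl h)
        · have := huniq k1 hk1 hkk; subst this
          exact Or.inl (Or.inr h)
        · have := huniq k1 hk1 hkk; subst this
          exact Or.inr ⟨k1, hk1, rfl, h⟩
    · rw [pairFoldS_junk groups p i hform]
      constructor
      · rintro (h | ⟨k, hk, rfl, _⟩)
        · exact Or.inl h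
        · exact absurd ⟨k, hk, rfl⟩ hform
      · rintro (h | ⟨k, hk, rfl, _⟩)
        · exact Or.inl h
        · exact absurd ⟨k, hk, rfl⟩ hform

-- ----- the bad sets stay duplicate-free -----

theorem nodup_pairFoldT (groups : List (List String)) (p : List String)
    (L : List (Int × String)) (st : PySem.Set Int × PySem.Set Int) (h : st.1.Nodup) :
    (pvPairFoldT (pvIndexOf groups) p st L).1.Nodup := by
  induction L generalizing st with
  | nil => exact h
  | cons jx rest ih =>
    obtain ⟨j, x⟩ := jx
    apply ih
    dsimp only
    split_ifs with hne
    all_goals first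
      | exact PySem.Set.nodup_union _ _ h
      | exact h

theorem nodup_pairFoldS (groups : List (List String)) (p : List String)
    (L : List (Int × String)) (st : PySem.Set Int × PySem.Set Int) (h : st.1.Nodup) :
    (pvPairFoldS (pvIndexOf groups) p st L).1.Nodup := by
  induction L generalizing st with
  | nil => exact h
  | cons jx rest ih =>
    obtain ⟨j, x⟩ := jx
    apply ih
    dsimp only
    split_ifs with hne
    all_goals first
      | exact PySem.Set.nodup_union _ _ h
      | exact h

theorem nodup_togBad (groups tog : List (List String)) (bad : PySem.Set Int)
    (h : bad.Nodup) :
    (tog.foldl (fun bad p =>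
        (pvPairFoldT (pvIndexOf groups) p (bad, PySem.Set.empty)
          (PySem.List.enumerate p 0)).1) bad).Nodup := by
  induction tog generalizing bad with
  | nil => exact h
  | cons p tog ih => exact ih _ (nodup_pairFoldT groups p _ _ h)

theorem nodup_sepBad (groups sep : List (List String)) (bad : PySem.Set Int)
    (h : bad.Nodup) :
    (sep.foldl (fun bad p =>
        (pvPairFoldS (pvIndexOf groups) p (bad, PySem.Set.empty)
          (PySem.List.enumerate p 0)).1) bad).Nodup := by
  induction sep generalizing bad with
  | nil => exact h
  | cons p sep ih => exact ih _ (nodup_pairFoldS groups p _ _ h)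

-- ----- counting -----

-- a Nodup set of group indices characterised by a predicate on the index has as many
-- elements as the matching indices
theorem len_indexSet (groups : List (List String)) (S : PySem.Set Int) (hnd : S.Nodup)
    (P : Nat → Bool)
    (hmem : ∀ i : Int, i ∈ S ↔ ∃ k : Nat, ∃ _ : k < groups.length, i = (k : Int) ∧ P k) :
    PySem.Set.len S = ((List.range groups.length).filter P).length := by
  have hnd2 : (((List.range groups.length).filter P).map (fun k : Nat => (k : Int))).Nodup :=
    (List.nodup_range.filter P).map (fun a b h => by exact_mod_cast h)
  have hperm : S.Perm (((List.range groups.length).filter P).map (fun k : Nat => (k : Int))) := by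
    rw [List.perm_ext_iff_of_nodup hnd hnd2]
    intro i
    rw [hmem]
    constructor
    · rintro ⟨k, hk, rfl, hp⟩
      exact List.mem_map.mpr ⟨k, List.mem_filter.mpr ⟨List.mem_range.mpr hk, hp⟩, rfl⟩
    · intro h
      rcases List.mem_map.mp h with ⟨k, hkf, rfl⟩
      rcases List.mem_filter.mp hkf with ⟨hk, hp⟩
      exact ⟨k, List.mem_range.mp hk, rfl, hp⟩
  have hlen := hperm.length_eq
  simp only [List.length_map] at hlen
  simp [PySem.Set.len, hlen]

-- countP over the groups = counting the matching indices
theorem countP_eq_filter_range (groups : List (List String)) (Q : List String → Bool) :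
    groups.countP Q =
      ((List.range groups.length).filter (fun k => Q (groups.getD k []))).length := by
  have hmap : (List.range groups.length).map (fun k => groups.getD k []) = groups := by
    apply List.ext_getElem
    · simp
    · intro n h1 h2
      simp [List.getD_eq_getElem?_getD, List.getElem?_eq_getElem h2]
  conv_lhs => rw [← hmap]
  rw [List.countP_map, List.countP_eq_length_filter]
  rfl

-- ===== VERDICT (by name: the statement is the Claim_ definition above) =====
theorem goodGroups_spec : Claim_equal_goodGroups := by
  intro num_tog tog num_sep sep num_group groups _ _
  unfold Spec_goodGroups
  have halt : goodGroups_alt num_tog tog num_sep sep num_group groups =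
      PySem.Set.len (tog.foldl (fun bad p =>
        (pvPairFoldT (pvIndexOf groups) p (bad, PySem.Set.empty)
          (PySem.List.enumerate p 0)).1) PySem.Set.empty) +
      PySem.Set.len (sep.foldl (fun bad p =>
        (pvPairFoldS (pvIndexOf groups) p (bad, PySem.Set.empty)
          (PySem.List.enumerate p 0)).1) PySem.Set.empty) := rfl
  rw [halt, goodGroups_eq_counts num_tog tog num_sep sep num_group groups]
  have h1 : PySem.Set.len (tog.foldl (fun bad p =>
        (pvPairFoldT (pvIndexOf groups) p (bad, PySem.Set.empty)
          (PySem.List.enumerate p 0)).1) PySem.Set.empty) =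
      ((List.range groups.length).filter
        (fun k => tog.any (pvBadT (groups.getD k [])))).length := by
    have hm : ∀ i : Int, i ∈ tog.foldl (fun bad p =>
        (pvPairFoldT (pvIndexOf groups) p (bad, PySem.Set.empty)
          (PySem.List.enumerate p 0)).1) PySem.Set.empty ↔
        ∃ k : Nat, ∃ _ : k < groups.length, i = (k : Int) ∧
          tog.any (pvBadT (groups.getD k [])) := by
      intro i
      rw [mem_togBad]
      simp only [PySem.Set.empty, List.not_mem_nil, false_or]
      constructor
      · rintro ⟨k, hk, rfl, h⟩
        exact ⟨k, hk, rfl, by rwa [List.getD_eq_getElem _ _ hk]⟩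
      · rintro ⟨k, hk, rfl, h⟩
        exact ⟨k, hk, rfl, by rwa [List.getD_eq_getElem _ _ hk] at h⟩
    exact len_indexSet groups _ (nodup_togBad groups tog _ List.nodup_nil) _ hm
  have h2 : PySem.Set.len (sep.foldl (fun bad p =>
        (pvPairFoldS (pvIndexOf groups) p (bad, PySem.Set.empty)
          (PySem.List.enumerate p 0)).1) PySem.Set.empty) =
      ((List.range groups.length).filter
        (fun k => sep.any (pvBadS (groups.getD k [])))).length := by
    have hm : ∀ i : Int, i ∈ sep.foldl (fun bad p =>
        (pvPairFoldS (pvIndexOf groups) p (bad, PySem.Set.empty)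
          (PySem.List.enumerate p 0)).1) PySem.Set.empty ↔
        ∃ k : Nat, ∃ _ : k < groups.length, i = (k : Int) ∧
          sep.any (pvBadS (groups.getD k [])) := by
      intro i
      rw [mem_sepBad]
      simp only [PySem.Set.empty, List.not_mem_nil, false_or]
      constructor
      · rintro ⟨k, hk, rfl, h⟩
        exact ⟨k, hk, rfl, by rwa [List.getD_eq_getElem _ _ hk]⟩
      · rintro ⟨k, hk, rfl, h⟩
        exact ⟨k, hk, rfl, by rwa [List.getD_eq_getElem _ _ hk] at h⟩
    exact len_indexSet groups _ (nodup_sepBad groups sep _ List.nodup_nil) _ hm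
  rw [h1, h2, countP_eq_filter_range groups (fun g => tog.any (pvBadT g)),
      countP_eq_filter_range groups (fun g => sep.any (pvBadS g))]
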